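-- pv_equiv track=rewrite | github.com/MarceloMassarente/Verba | ingestor/etl_a2_intelligent.py | match_aliases
-- ===== SOURCE A (Python) =====
-- from typing import List, Callable, Dict, Optional, Set
--
-- def match_aliases(text: str, gaz: Dict) -> List[str]:
--     """Compatibilidade: encontra entity_ids que correspondem a aliases"""
--     if not text or not gaz:
--         return []
--
--     t_lower = text.lower()
--     hits = []
--
--     for eid, aliases in gaz.items():
--         for alias in aliases:
--             if alias.lower() in t_lower:
--                 hits.append(eid)
--                 break
--
--     return sorted(set(hits))
-- ===== SOURCE B (Python) =====
-- def match_aliases(text, gaz):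
--     """Same result as A, but each distinct lowered alias is substring-tested
--     against the text only once, via a precomputed set of matched aliases."""
--     if not text or not gaz:
--         return []
--     t = text.lower()
--     distinct = {a.lower() for _eid, aliases in gaz.items() for a in aliases}
--     matched = {a for a in distinct if a in t}
--     return sorted({eid for eid, aliases in gaz.items()
--                    if any(a.lower() in matched for a in aliases)})
-- ===== Notes on version B (the rewrite author's own statement) =====
-- stated objective: alternative
-- what changed: Instead of substring-testing every alias occurrence per entity with a break, B first builds the set of distinct lowered aliases, substring-tests each distinct alias once to get a matched-alias set, then selects entities by set membership.
import Mathlib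
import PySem

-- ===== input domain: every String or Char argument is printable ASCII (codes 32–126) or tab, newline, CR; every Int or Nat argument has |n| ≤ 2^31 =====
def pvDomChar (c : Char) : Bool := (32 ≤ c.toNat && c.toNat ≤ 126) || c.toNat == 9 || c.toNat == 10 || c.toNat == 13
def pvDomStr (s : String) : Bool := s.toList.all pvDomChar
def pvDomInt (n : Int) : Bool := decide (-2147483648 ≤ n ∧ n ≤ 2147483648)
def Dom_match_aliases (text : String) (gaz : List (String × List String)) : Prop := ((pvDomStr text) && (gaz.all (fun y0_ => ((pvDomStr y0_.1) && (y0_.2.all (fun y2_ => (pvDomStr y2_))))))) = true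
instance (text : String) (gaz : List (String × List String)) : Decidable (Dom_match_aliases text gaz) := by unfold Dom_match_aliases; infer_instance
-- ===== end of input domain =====

-- B tests each distinct lowered alias against the text once via a precomputed matched-alias set; A tests per occurrence with a break. Same result, proved equal; no speed claim.

-- ===== PORT A =====
-- inner 'for alias in aliases: if alias.lower() in t_lower: … break' — true iff the break fires
def pvAInner (t : String) : List String → Bool
  | [] => false
  | a :: rest => if PySem.Str.isIn (PySem.Str.lower a) t then true else pvAInner t rest

def match_aliases (text : String) (gaz : List (String × List String)) : List String :=
  if text = "" ∨ gaz = [] then []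
  else
    let tLower := PySem.Str.lower text
    let hits := gaz.foldl (fun hits p => if pvAInner tLower p.2 then hits ++ [p.1] else hits) []
    PySem.List.sorted (PySem.Set.ofList hits) (fun x => x) false

-- ===== PORT B =====
def match_aliases_alt (text : String) (gaz : List (String × List String)) : List String :=
  if text = "" ∨ gaz = [] then []
  else
    let t := PySem.Str.lower text
    let distinct : PySem.Set String :=
      PySem.Set.ofList (gaz.flatMap (fun p => p.2.map PySem.Str.lower))
    let matched : PySem.Set String :=
      PySem.Set.ofList (distinct.filter (fun a => PySem.Str.isIn a t))
    PySem.List.sorted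
      (PySem.Set.ofList
        ((gaz.filter (fun p => p.2.any (fun a => PySem.Set.contains matched (PySem.Str.lower a)))).map Prod.fst))
      (fun x => x) false

-- ===== PRECONDITION & SPEC =====
def Spec_match_aliases (text : String) (gaz : List (String × List String)) (out : List String) : Prop := out = match_aliases_alt text gaz
instance (text : String) (gaz : List (String × List String)) (out : List String) : Decidable (Spec_match_aliases text gaz out) := by unfold Spec_match_aliases; infer_instance

-- ===== CLAIM (what is proved, stated in full; the proofs are below) =====
def Claim_equal_match_aliases : Prop := ∀ (text : String) (gaz : List (String × List String)), Dom_match_aliases text gaz → Spec_match_aliases text gaz (match_aliases text gaz)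

-- ===== LEMMAS AND PROOFS =====

-- A's inner break-loop is List.any of the same test
lemma pvAInner_eq_any (t : String) (l : List String) :
    pvAInner t l = l.any (fun a => PySem.Str.isIn (PySem.Str.lower a) t) := by
  induction l with
  | nil => rfl
  | cons a rest ih => simp [pvAInner, List.any_cons, ih]

-- membership in B's matched set, for an alias actually occurring in gaz
lemma pvMatched_contains (t : String) (gaz : List (String × List String))
    (p : String × List String) (hp : p ∈ gaz) (a : String) (ha : a ∈ p.2) :
    PySem.Set.contains
      (PySem.Set.ofList
        ((PySem.Set.ofList (gaz.flatMap (fun q => q.2.map PySem.Str.lower))).filter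
          (fun x => PySem.Str.isIn x t)))
      (PySem.Str.lower a) = PySem.Str.isIn (PySem.Str.lower a) t := by
  have hmem : PySem.Str.lower a ∈ gaz.flatMap (fun q => q.2.map PySem.Str.lower) := by
    exact List.mem_flatMap.mpr ⟨p, hp, List.mem_map.mpr ⟨a, ha, rfl⟩⟩
  by_cases h : PySem.Str.isIn (PySem.Str.lower a) t = true
  · rw [h]
    rw [PySem.Set.contains_iff, PySem.Set.mem_ofList, List.mem_filter]
    exact ⟨(PySem.Set.mem_ofList _ _).mpr hmem, h⟩
  · rw [Bool.not_eq_true] at h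
    rw [h, Bool.eq_false_iff]
    intro hc
    rw [PySem.Set.contains_iff, PySem.Set.mem_ofList, List.mem_filter] at hc
    rw [hc.2] at h
    exact Bool.true_eq_false.mp h

-- ===== VERDICT (by name: the statement is the Claim_ definition above) =====
theorem match_aliases_spec : Claim_equal_match_aliases := by
  intro text gaz _
  unfold Spec_match_aliases match_aliases match_aliases_alt
  by_cases hguard : text = "" ∨ gaz = []
  · simp [hguard]
  · simp only [hguard, if_false]
    rw [PySem.List.foldl_append_if (p := fun p => pvAInner (PySem.Str.lower text) p.2)
        (f := Prod.fst)]
    rw [List.nil_append]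
    congr 2
    apply congrArg (List.map Prod.fst)
    apply List.filter_congr
    intro p hp
    rw [pvAInner_eq_any]
    apply PySem.List.any_congr_mem
    intro a ha
    rw [pvMatched_contains (PySem.Str.lower text) gaz p hp a ha]
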